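-- pv_equiv track=rewrite | github.com/Tarpon907/AoC2022 | Day25/Day25.py | carry_the_one
-- ===== SOURCE A (Python) =====
-- numbers = "=-012"
--
-- def carry_the_one(str1):
--     last_digit = str1[-1]
--     last_val = numbers.index(last_digit) - 2
--     if last_val == 2:
--         return carry_the_one(str1[:-1]) + "="
--     else:
--         last_val = last_val + 1
--         return str1[:-1] + str(numbers[last_val + 2])
-- ===== SOURCE B (Python) =====
-- def carry_the_one(str1):
--     bump = {'=': '-', '-': '0', '0': '1', '1': '2'}
--     chars = list(str1)
--     i = len(chars) - 1
--     while i >= 0 and chars[i] == '2':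
--         chars[i] = '='
--         i -= 1
--     if i < 0:
--         chars.insert(0, '1')
--     else:
--         chars[i] = bump[chars[i]]
--     return ''.join(chars)
-- ===== Notes on version B (the rewrite author's own statement) =====
-- stated objective: simpler
-- what changed: Replaces the recursion with repeated slicing (str1[:-1] copies on every carry) by a single in-place right-to-left scan over a char list that turns trailing '2's into '=' and bumps the first non-'2' digit via a small map.
import Mathlib
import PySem

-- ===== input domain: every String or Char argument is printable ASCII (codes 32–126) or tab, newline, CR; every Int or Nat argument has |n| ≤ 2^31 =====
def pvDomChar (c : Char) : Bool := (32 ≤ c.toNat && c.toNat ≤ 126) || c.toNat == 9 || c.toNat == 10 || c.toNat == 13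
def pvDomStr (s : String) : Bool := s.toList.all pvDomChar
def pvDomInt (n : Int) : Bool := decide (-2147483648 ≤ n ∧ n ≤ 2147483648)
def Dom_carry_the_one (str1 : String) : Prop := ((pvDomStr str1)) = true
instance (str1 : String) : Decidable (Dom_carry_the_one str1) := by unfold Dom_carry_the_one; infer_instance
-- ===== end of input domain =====

-- B: one right-to-left carry pass over a char list instead of A's recursion with repeated slicing (simpler; equal return values on Pre_).

-- ===== PORT A =====
-- numbers = "=-012"
def pvNumbers : List Char := ['=', '-', '0', '1', '2']

-- recursive body of A, over the char list of str1; [] stands for the raising paths (excluded by Pre_)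
def pvCarryA (cs : List Char) : List Char :=
  match h : PySem.List.pyGet? cs (-1) with
  | none => []  -- IndexError: str1[-1] on empty
  | some last_digit =>
    match PySem.List.index? pvNumbers last_digit with
    | none => []  -- ValueError: numbers.index
    | some idx =>
      if (idx : Int) - 2 = 2 then
        pvCarryA cs.dropLast ++ ['=']
      else
        cs.dropLast ++ [PySem.List.pyGetD pvNumbers ((idx : Int) - 2 + 1 + 2) ' ']
termination_by cs.length
decreasing_by
  have hne : cs ≠ [] := by
    intro hnil; rw [hnil] at h; simp [PySem.List.pyGet?, PySem.List.pyIdx?] at h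
  have : 0 < cs.length := List.length_pos_of_ne_nil hne
  simp [List.length_dropLast]; omega

def carry_the_one (str1 : String) : String := String.ofList (pvCarryA str1.toList)

-- ===== PORT B =====
-- bump = {'=': '-', '-': '0', '0': '1', '1': '2'}
def pvBump : PySem.Dict Char Char :=
  PySem.Dict.ofList [('=', '-'), ('-', '0'), ('0', '1'), ('1', '2')]

-- B's right-to-left while-loop, as structural recursion on the REVERSED char list:
-- each '2' becomes '=' and carries; running off the left end inserts '1'; otherwise bump once.
def pvCarryB (rcs : List Char) : List Char :=
  match rcs with
  | [] => ['1']  -- i < 0: chars.insert(0, '1')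
  | c :: rest =>
    if c == '2' then '=' :: pvCarryB rest
    else
      match PySem.Dict.get? pvBump c with
      | none => []  -- KeyError (excluded by Pre_)
      | some c' => c' :: rest

def carry_the_one_alt (str1 : String) : String :=
  String.ofList ((pvCarryB str1.toList.reverse).reverse)

-- ===== PRECONDITION & SPEC =====
-- Pre_: scanning from the right, the trailing run of '2's must end at a digit in "=-01";
-- otherwise A raises (IndexError when the whole string is '2's or empty, ValueError on a non-SNAFU digit), so Pre_ excludes exactly A's raising inputs.
def Pre_carry_the_one (str1 : String) : Prop :=
  (str1.toList.reverse.dropWhile (fun c => c == '2')) ≠ [] ∧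
  (str1.toList.reverse.dropWhile (fun c => c == '2')).headI ∈ (['=', '-', '0', '1'] : List Char)
instance (str1 : String) : Decidable (Pre_carry_the_one str1) := by unfold Pre_carry_the_one; infer_instance

def pvWitness_carry_the_one : String := "12"

def Spec_carry_the_one (str1 : String) (out : String) : Prop := out = carry_the_one_alt str1
instance (str1 : String) (out : String) : Decidable (Spec_carry_the_one str1 out) := by unfold Spec_carry_the_one; infer_instance

-- ===== CLAIM (what is proved, stated in full; the proofs are below) =====
def Claim_equal_carry_the_one : Prop := ∀ (str1 : String), Dom_carry_the_one str1 → Pre_carry_the_one str1 → Spec_carry_the_one str1 (carry_the_one str1)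

-- ===== LEMMAS AND PROOFS =====

-- one unfolding step of A's recursion when the last character c is a SNAFU digit with index k
lemma pvCarryA_concat (l : List Char) (c : Char) (k : Nat)
    (hk : PySem.List.index? pvNumbers c = some k) :
    pvCarryA (l ++ [c]) =
      if (k : Int) - 2 = 2 then pvCarryA l ++ ['=']
      else l ++ [PySem.List.pyGetD pvNumbers ((k : Int) - 2 + 1 + 2) ' '] := by
  rw [pvCarryA]
  split
  · next heq => rw [PySem.List.pyGet?_neg_one_append_singleton] at heq; exact absurd heq (by simp)
  · next x heq =>
    rw [PySem.List.pyGet?_neg_one_append_singleton] at heq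
    obtain rfl : c = x := by injection heq
    rw [hk]
    simp

-- main equivalence, phrased over the reversed character list
lemma pvCarry_main (rcs : List Char)
    (h1 : (rcs.dropWhile (fun c => c == '2')) ≠ [])
    (h2 : (rcs.dropWhile (fun c => c == '2')).headI ∈ (['=', '-', '0', '1'] : List Char)) :
    pvCarryA rcs.reverse = (pvCarryB rcs).reverse := by
  induction rcs with
  | nil => simp at h1
  | cons c rest ih =>
    by_cases hc : c = '2'
    · subst hc
      rw [List.dropWhile_cons_of_pos (by decide)] at h1 h2
      rw [List.reverse_cons, pvCarryA_concat _ _ 4 (by decide)]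
      norm_num
      rw [ih h1 h2, pvCarryB]
      simp
    · rw [List.dropWhile_cons_of_neg (by simpa using hc)] at h2
      simp only [List.headI_cons] at h2
      rw [List.reverse_cons]
      fin_cases h2
      · rw [pvCarryA_concat _ _ 0 (by decide), if_neg (by norm_num), pvCarryB,
             if_neg (by decide), show pvBump.get? '=' = some '-' from by decide]
        simp
        decide
      · rw [pvCarryA_concat _ _ 1 (by decide), if_neg (by norm_num), pvCarryB,
             if_neg (by decide), show pvBump.get? '-' = some '0' from by decide]
        simp
        decide
      · rw [pvCarryA_concat _ _ 2 (by decide), if_neg (by norm_num), pvCarryB,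
             if_neg (by decide), show pvBump.get? '0' = some '1' from by decide]
        simp
        decide
      · rw [pvCarryA_concat _ _ 3 (by decide), if_neg (by norm_num), pvCarryB,
             if_neg (by decide), show pvBump.get? '1' = some '2' from by decide]
        simp
        decide

theorem carry_the_one_spec : Claim_equal_carry_the_one := by
  intro str1 _ hpre
  obtain ⟨h1, h2⟩ := hpre
  unfold Spec_carry_the_one carry_the_one carry_the_one_alt
  have := pvCarry_main str1.toList.reverse h1 h2
  rw [List.reverse_reverse] at this
  rw [this]
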